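-- pv_equiv track=rewrite | github.com/manwar/perlweeklychallenge-club | challenge-282/roger-bell-west/python/ch-1.py | goodinteger
-- ===== SOURCE A (Python) =====
-- import collections
-- from itertools import islice
--
-- def sliding_window(iterable, n):
--     # sliding_window('ABCDEFG', 4) --> ABCD BCDE CDEF DEFG
--     it = iter(iterable)
--     window = collections.deque(islice(it, n), maxlen=n)
--     if len(window) == n:
--         yield tuple(window)
--     for x in it:
--         window.append(x)
--         yield tuple(window)
--
-- def goodinteger(a):
--   winsize = 3
--   d = str(a)
--   for offset, cc in enumerate(sliding_window(d, winsize)):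
--     if cc[0] == cc[1] and cc[1] == cc[2]:
--       if (offset == 0 or d[offset - 1] != cc[0]) and (offset == len(d) - winsize or d[offset + winsize] != cc[2]):
--         return int("".join(cc))
--   return -1
-- ===== SOURCE B (Python) =====
-- from itertools import groupby
--
-- def goodinteger(a):
--     for digit, group in groupby(str(a)):
--         if len(list(group)) == 3:
--             return int(digit * 3)
--     return -1
-- ===== Notes on version B (the rewrite author's own statement) =====
-- stated objective: idiomatic
-- what changed: Replaced the fixed-size sliding window with before/after neighbour checks by itertools.groupby run-length grouping: the first maximal digit run of length exactly three gives the answer.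
import Mathlib
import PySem

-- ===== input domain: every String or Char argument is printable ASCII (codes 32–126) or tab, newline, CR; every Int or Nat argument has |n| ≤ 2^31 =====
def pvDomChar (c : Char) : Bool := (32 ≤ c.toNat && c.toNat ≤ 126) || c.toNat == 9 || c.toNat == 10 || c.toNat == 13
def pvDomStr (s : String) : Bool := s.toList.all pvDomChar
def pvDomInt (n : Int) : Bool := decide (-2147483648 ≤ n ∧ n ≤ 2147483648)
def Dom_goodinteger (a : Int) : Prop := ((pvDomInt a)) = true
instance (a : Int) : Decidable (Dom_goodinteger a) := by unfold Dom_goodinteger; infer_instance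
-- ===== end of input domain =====

-- B replaces A's size-3 sliding window with before/after neighbour checks by run-length
-- grouping (itertools.groupby): more idiomatic, same cost.

-- ===== PORT A =====
-- A's sliding-window loop: one window (c0,c1,c2) per step, the same tests in the same order;
-- int("".join(cc)) ported as ofStr? with default 0 (the none case is unreachable: the window
-- is three equal digits of str(a))
def goWinA (d : List Char) (offset : Nat) : List Char → Int
  | c0 :: c1 :: c2 :: tl =>
      if c0 = c1 ∧ c1 = c2 then
        if (offset = 0 ∨ d[offset - 1]? ≠ some c0) ∧
           (offset = d.length - 3 ∨ d[offset + 3]? ≠ some c2) then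
          (PySem.Int.ofStr? (String.ofList [c0, c1, c2])).getD 0
        else goWinA d (offset + 1) (c1 :: c2 :: tl)
      else goWinA d (offset + 1) (c1 :: c2 :: tl)
  | _ => -1

def goodinteger (a : Int) : Int :=
  let d := (PySem.Int.toStr a).toList
  goWinA d 0 d

-- ===== PORT B =====
-- groupby(str(a)): the maximal runs as (char, length) pairs
def runsB : List Char → List (Char × Nat)
  | [] => []
  | c :: tl =>
    match runsB tl with
    | (c', n) :: R => if c = c' then (c, n + 1) :: R else (c, 1) :: (c', n) :: R
    | [] => [(c, 1)]

-- the first run of length exactly 3 wins; int(digit*3) ported as ofStr? with default 0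
-- (the none case is unreachable: digit is a digit of str(a))
def findRunB : List (Char × Nat) → Int
  | [] => -1
  | (c, n) :: R => if n = 3 then (PySem.Int.ofStr? (String.ofList [c, c, c])).getD 0 else findRunB R

def goodinteger_alt (a : Int) : Int :=
  findRunB (runsB (PySem.Int.toStr a).toList)

-- ===== PRECONDITION & SPEC =====
def Spec_goodinteger (a : Int) (out : Int) : Prop := out = goodinteger_alt a
instance (a : Int) (out : Int) : Decidable (Spec_goodinteger a out) := by unfold Spec_goodinteger; infer_instance

-- ===== CLAIM (what is proved, stated in full; the proofs are below) =====
def Claim_equal_goodinteger : Prop := ∀ (a : Int), Dom_goodinteger a → Spec_goodinteger a (goodinteger a)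

-- ===== LEMMAS AND PROOFS =====

-- local reformulation of A's loop: p is the character just before the current suffix (none at offset 0)
def locW (p : Option Char) : List Char → Int
  | c0 :: c1 :: c2 :: tl =>
      if c0 = c1 ∧ c1 = c2 ∧ p ≠ some c0 ∧ tl.head? ≠ some c2 then
        (PySem.Int.ofStr? (String.ofList [c0, c1, c2])).getD 0
      else locW (some c0) (c1 :: c2 :: tl)
  | _ => -1

-- findRunB with the previous run's character threaded through (mirrors locW over runs)
def findRunP (p : Option Char) : List (Char × Nat) → Int
  | [] => -1
  | (c, n) :: R => if n = 3 ∧ p ≠ some c then (PySem.Int.ofStr? (String.ofList [c, c, c])).getD 0 else findRunP (some c) R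

theorem runsB_cons_ex (c : Char) (l : List Char) :
    ∃ n R, runsB (c :: l) = (c, n) :: R ∧ 1 ≤ n := by
  unfold runsB
  match h : runsB l with
  | [] => exact ⟨1, [], rfl, le_refl _⟩
  | (c', n) :: R =>
    by_cases hc : c = c'
    · subst hc; simp
    · simp [hc]

theorem runsB_chain (l : List Char) :
    (runsB l).IsChain (fun x y => x.1 ≠ y.1) := by
  induction l with
  | nil => simp [runsB]
  | cons c tl ih =>
    unfold runsB
    match h : runsB tl with
    | [] => simp
    | (c', n) :: R =>
      rw [h] at ih
      rw [List.isChain_cons] at ih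
      by_cases hc : c = c'
      · subst hc
        simp only [if_true]
        exact ih.2.cons ih.1
      · simp only [hc, if_false]
        rw [List.isChain_cons_cons]
        exact ⟨hc, ih.2.cons ih.1⟩

theorem runsB_cons_head (c : Char) (l : List Char) (h : l.head? = some c) :
    ∃ n R, runsB l = (c, n) :: R ∧ runsB (c :: l) = (c, n + 1) :: R ∧ 1 ≤ n := by
  match l with
  | c' :: tl =>
    have hcc : c' = c := by simpa using h
    obtain ⟨n, R, hr, hn⟩ := runsB_cons_ex c' tl
    refine ⟨n, R, hcc ▸ hr, ?_, hn⟩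
    conv_lhs => rw [runsB]
    rw [hr]
    simp [hcc]

theorem runsB_cons_ne (c : Char) (l : List Char) (h : l.head? ≠ some c) :
    runsB (c :: l) = (c, 1) :: runsB l := by
  match l with
  | [] => rfl
  | c' :: tl =>
    have hne : c ≠ c' := fun he => h (by simp [he])
    obtain ⟨n, R, hr, _⟩ := runsB_cons_ex c' tl
    conv_lhs => rw [runsB]
    rw [hr]
    simp [hne]

theorem locW_eq_findRunP (l : List Char) (p : Option Char) :
    locW p l = findRunP p (runsB l) := by
  induction l generalizing p with
  | nil => rfl
  | cons c0 l' ih =>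
    match l' with
    | [] => simp [locW, runsB, findRunP]
    | [c1] =>
      by_cases h : c0 = c1
      · subst h; simp [locW, runsB, findRunP]
      · simp [locW, runsB, findRunP, h]
    | c1 :: c2 :: tl =>
      by_cases h01 : c0 = c1
      · by_cases h12 : c1 = c2
        · subst h01; subst h12
          by_cases ht : tl.head? = some c0
          · -- run of length ≥ 4: step into the run
            obtain ⟨m, R, hr, hr1, hm⟩ := runsB_cons_head c0 tl ht
            obtain ⟨m2, R2, hr2, hr3, _⟩ := runsB_cons_head c0 (c0 :: tl) (by simp)
            rw [hr1] at hr2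
            injection hr2 with hx hy
            injection hx with hx1 hx2
            subst hx2; subst hy
            obtain ⟨m3, R3, hr4, hr5, _⟩ := runsB_cons_head c0 (c0 :: c0 :: tl) (by simp)
            rw [hr3] at hr4
            injection hr4 with hx hy
            injection hx with hx1 hx2
            subst hx2; subst hy
            rw [show locW p (c0 :: c0 :: c0 :: tl) = locW (some c0) (c0 :: c0 :: tl) by
                  simp [locW, ht]]
            rw [ih (some c0), hr3, hr5]
            unfold findRunP
            have : ¬ (m + 1 + 1 + 1 = 3) := by omega
            simp [this]
          · -- run of length exactly 3
            have hr2 := runsB_cons_ne c0 tl ht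
            obtain ⟨m2, R2, hr3, hr4, _⟩ := runsB_cons_head c0 (c0 :: tl) (by simp)
            rw [hr2] at hr3
            injection hr3 with hx hy
            injection hx with hx1 hx2
            subst hx2; subst hy
            obtain ⟨m3, R3, hr5, hr6, _⟩ := runsB_cons_head c0 (c0 :: c0 :: tl) (by simp)
            rw [hr4] at hr5
            injection hr5 with hx hy
            injection hx with hx1 hx2
            subst hx2; subst hy
            by_cases hp : p = some c0
            · rw [show locW p (c0 :: c0 :: c0 :: tl) = locW (some c0) (c0 :: c0 :: tl) by
                    simp [locW, hp]]
              rw [ih (some c0), hr4, hr6]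
              unfold findRunP
              simp [hp]
            · rw [show locW p (c0 :: c0 :: c0 :: tl) =
                    (PySem.Int.ofStr? (String.ofList [c0, c0, c0])).getD 0 by
                    simp [locW, hp, ht]]
              rw [hr6]
              unfold findRunP
              simp [hp]
        · -- c0 = c1, c1 ≠ c2
          subst h01
          have hr2 := runsB_cons_ne c0 (c2 :: tl) (by simpa using fun h => h12 h.symm)
          obtain ⟨m, R, hr3, hr4, _⟩ := runsB_cons_head c0 (c0 :: c2 :: tl) (by simp)
          rw [hr2] at hr3
          injection hr3 with hx hy
          injection hx with hx1 hx2
          subst hx2; subst hy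
          rw [show locW p (c0 :: c0 :: c2 :: tl) = locW (some c0) (c0 :: c2 :: tl) by
                simp [locW, h12]]
          rw [ih (some c0), hr2, hr4]
          unfold findRunP
          simp
      · -- c0 ≠ c1
        have hr2 := runsB_cons_ne c0 (c1 :: c2 :: tl) (by simpa using fun h => h01 h.symm)
        obtain ⟨m, R, hr3, _⟩ := runsB_cons_ex c1 (c2 :: tl)
        rw [show locW p (c0 :: c1 :: c2 :: tl) = locW (some c0) (c1 :: c2 :: tl) by
              simp [locW, h01]]
        rw [ih (some c0), hr2, hr3]
        unfold findRunP
        conv_rhs => rw [findRunP]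
        simp [h01]

theorem findRunP_eq_findRunB (L : List (Char × Nat)) (p : Option Char)
    (hc : L.IsChain (fun x y => x.1 ≠ y.1))
    (hp : ∀ c n R, L = (c, n) :: R → p ≠ some c) :
    findRunP p L = findRunB L := by
  induction L generalizing p with
  | nil => rfl
  | cons x R ih =>
    obtain ⟨c, n⟩ := x
    have hpc : p ≠ some c := hp c n R rfl
    rw [List.isChain_cons] at hc
    unfold findRunP findRunB
    by_cases h3 : n = 3
    · simp [h3, hpc]
    · simp only [h3, false_and, if_false]
      refine ih (some c) hc.2 ?_
      intro a b R' hR he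
      injection he with he
      subst hR
      exact hc.1 (a, b) (by simp) he

theorem goWinA_eq_locW (rest : List Char) :
    ∀ pre : List Char, goWinA (pre ++ rest) pre.length rest = locW pre.getLast? rest := by
  induction rest with
  | nil => intro pre; rfl
  | cons c0 rest' ih =>
    intro pre
    match rest' with
    | [] => rfl
    | [c1] => rfl
    | c1 :: c2 :: tl =>
      have hL : (pre.length = 0 ∨ (pre ++ c0 :: c1 :: c2 :: tl)[pre.length - 1]? ≠ some c0)
          ↔ pre.getLast? ≠ some c0 := by
        rcases pre.eq_nil_or_concat with rfl | ⟨q, e, rfl⟩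
        · simp
        · simp only [List.concat_eq_append]
          have hkey : (q ++ [e] ++ c0 :: c1 :: c2 :: tl)[(q ++ [e]).length - 1]? = some e := by
            rw [List.getElem?_append_left (by simp)]
            rw [← List.getLast?_eq_getElem?, List.getLast?_concat]
          constructor
          · rintro (h | h)
            · simp at h
            · rw [List.getLast?_concat]
              rwa [hkey] at h
          · intro h
            right
            rw [List.getLast?_concat] at h
            rwa [hkey]
      have hget3 : (pre ++ c0 :: c1 :: c2 :: tl)[pre.length + 3]? = tl.head? := by
        rw [List.getElem?_append_right (by omega)]
        simp [List.head?_eq_getElem?]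
      have hR : (pre.length = (pre ++ c0 :: c1 :: c2 :: tl).length - 3 ∨
            (pre ++ c0 :: c1 :: c2 :: tl)[pre.length + 3]? ≠ some c2)
          ↔ tl.head? ≠ some c2 := by
        rw [hget3]
        rcases tl with _ | ⟨t, tl'⟩
        · simp
        · simp only [List.length_append, List.length_cons]
          constructor
          · rintro (h | h)
            · omega
            · exact h
          · intro h; right; exact h
      have hrec : goWinA (pre ++ c0 :: c1 :: c2 :: tl) (pre.length + 1) (c1 :: c2 :: tl)
          = locW (some c0) (c1 :: c2 :: tl) := by
        have := ih (pre ++ [c0])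
        rw [List.append_assoc] at this
        simpa using this
      by_cases h01 : c0 = c1
      · by_cases h12 : c1 = c2
        · subst h12; subst h01
          conv_lhs => rw [goWinA]
          conv_rhs => rw [locW]
          simp only [and_self, if_true, true_and]
          by_cases hA : pre.getLast? ≠ some c0
          · by_cases hB : tl.head? ≠ some c0
            · rw [if_pos ⟨hL.mpr hA, hR.mpr hB⟩, if_pos ⟨hA, hB⟩]
            · rw [if_neg (by rintro ⟨_, h2⟩; exact hB (hR.mp h2)), if_neg (by tauto), hrec]
          · rw [if_neg (by rintro ⟨h1, _⟩; exact hA (hL.mp h1)), if_neg (by tauto), hrec]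
        · conv_lhs => rw [goWinA]
          conv_rhs => rw [locW]
          rw [if_neg (by tauto), if_neg (by tauto), hrec]
      · conv_lhs => rw [goWinA]
        conv_rhs => rw [locW]
        rw [if_neg (by tauto), if_neg (by tauto), hrec]

theorem goodinteger_eq_alt (a : Int) : goodinteger a = goodinteger_alt a := by
  unfold goodinteger goodinteger_alt
  have h1 := goWinA_eq_locW ((PySem.Int.toStr a).toList) []
  simp only [List.nil_append, List.length_nil, List.getLast?_nil] at h1
  rw [h1, locW_eq_findRunP]
  exact findRunP_eq_findRunB _ none (runsB_chain _) (fun c n R _ h => by simp at h)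

-- ===== VERDICT (by name: the statement is the Claim_ definition above) =====
theorem goodinteger_spec : Claim_equal_goodinteger := by
  intro a _
  exact goodinteger_eq_alt a
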